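-- pv_equiv track=rewrite | github.com/mbregieira/MagicGuess | magicguess/transforms.py | apply_case_variants
-- ===== SOURCE A (Python) =====
-- def apply_case_variants(word: str):
--     if not word:
--         return []
--     w = word.lower()
--     out = [w]
--     if len(w) >= 1:
--         out.append(w[0].upper() + w[1:])
--         out.append(w[:-1] + w[-1].upper())
--     if len(w) >= 2:
--         out.append(w[0].upper() + w[1:-1] + w[-1].upper())
--     # return unique preserving order
--     seen = set()
--     res = []
--     for x in out:
--         if x not in seen:
--             res.append(x)
--             seen.add(x)
--     return res
-- ===== SOURCE B (Python) =====
-- def apply_case_variants(word: str):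
--     # Dedup-free: predict which variants are distinct from the case-change flags
--     # of the boundary characters and emit each exactly once.
--     if not word:
--         return []
--     w = word.lower()
--     head, last = w[0], w[-1]
--     H, L = head.upper(), last.upper()
--     res = [w]
--     if len(w) == 1:
--         if H != head:
--             res.append(H)
--         return res
--     if H != head:
--         res.append(H + w[1:])
--     if L != last:
--         res.append(w[:-1] + L)
--     if H != head and L != last:
--         res.append(H + w[1:-1] + L)
--     return res
-- ===== Notes on version B (the rewrite author's own statement) =====
-- stated objective: alternative
-- what changed: A generates all four case variants and then removes duplicates with a seen-set pass; B has no deduplication at all: it computes the case-change flags of the boundary characters (does upper() change w[0] / w[-1]?) and emits each distinct variant exactly once, branching on those flags.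
import Mathlib
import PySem

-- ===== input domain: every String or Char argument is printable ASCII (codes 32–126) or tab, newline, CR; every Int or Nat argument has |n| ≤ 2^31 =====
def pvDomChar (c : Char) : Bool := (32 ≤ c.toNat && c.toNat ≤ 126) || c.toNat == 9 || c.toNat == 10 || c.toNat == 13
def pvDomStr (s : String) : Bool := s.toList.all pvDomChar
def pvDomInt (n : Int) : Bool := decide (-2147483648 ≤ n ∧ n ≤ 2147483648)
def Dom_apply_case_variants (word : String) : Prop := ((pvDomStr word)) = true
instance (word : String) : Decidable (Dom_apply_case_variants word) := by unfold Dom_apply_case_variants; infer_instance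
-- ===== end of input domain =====

-- B replaces A's generate-all-then-dedup pass by a dedup-free construction that emits each
-- distinct variant exactly once, branching on whether upper() changes the boundary characters;
-- alternative decomposition, same cost.

-- ===== PORT A =====
def apply_case_variants (word : String) : List String :=
  if word.toList = [] then []
  else
    let w := PySem.Chars.lower word.toList
    let out : List (List Char) := [w]
    let out := if (1:Int) ≤ PySem.Chars.len w then
        (out ++ [[PySem.Chars.upperChar (PySem.List.pyGetD w 0 ' ')] ++ PySem.List.slice w (some 1) none])
          ++ [PySem.List.slice w none (some (-1)) ++ [PySem.Chars.upperChar (PySem.List.pyGetD w (-1) ' ')]]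
      else out
    let out := if (2:Int) ≤ PySem.Chars.len w then
        out ++ [[PySem.Chars.upperChar (PySem.List.pyGetD w 0 ' ')] ++ PySem.List.slice w (some 1) (some (-1))
                 ++ [PySem.Chars.upperChar (PySem.List.pyGetD w (-1) ' ')]]
      else out
    ((out.foldl (fun (p : PySem.Set (List Char) × List (List Char)) x =>
        if PySem.Set.contains p.1 x then p else (PySem.Set.add p.1 x, p.2 ++ [x]))
      (PySem.Set.empty, [])).2).map String.ofList

-- ===== PORT B =====
def apply_case_variants_alt (word : String) : List String :=
  if word.toList = [] then []
  else
    let w := PySem.Chars.lower word.toList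
    let head := PySem.List.pyGetD w 0 ' '
    let last := PySem.List.pyGetD w (-1) ' '
    let H := PySem.Chars.upperChar head
    let L := PySem.Chars.upperChar last
    let res : List (List Char) := [w]
    if PySem.Chars.len w = 1 then
      (if H ≠ head then res ++ [[H]] else res).map String.ofList
    else
      let res := if H ≠ head then res ++ [[H] ++ PySem.List.slice w (some 1) none] else res
      let res := if L ≠ last then res ++ [PySem.List.slice w none (some (-1)) ++ [L]] else res
      let res := if H ≠ head ∧ L ≠ last then
          res ++ [[H] ++ PySem.List.slice w (some 1) (some (-1)) ++ [L]] else res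
      res.map String.ofList

-- ===== PRECONDITION & SPEC =====
def Spec_apply_case_variants (word : String) (out : List String) : Prop := out = apply_case_variants_alt word
instance (word : String) (out : List String) : Decidable (Spec_apply_case_variants word out) := by unfold Spec_apply_case_variants; infer_instance

-- ===== CLAIM (what is proved, stated in full; the proofs are below) =====
def Claim_equal_apply_case_variants : Prop := ∀ (word : String), Dom_apply_case_variants word → Spec_apply_case_variants word (apply_case_variants word)

-- ===== LEMMAS AND PROOFS =====

-- A's seen-set loop keeps seen and res equal, so it computes the ordered dedup (= Set.ofList).
lemma pvDedupLoopMemAux {α : Type} [BEq α] [LawfulBEq α] (xs : List α) (a : List α) :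
    (xs.foldl (fun (p : PySem.Set α × List α) x =>
        if x ∈ p.1 then p else (PySem.Set.add p.1 x, p.2 ++ [x])) (a, a)).2
      = xs.foldl PySem.Set.add a := by
  induction xs generalizing a with
  | nil => rfl
  | cons x xs ih =>
    simp only [List.foldl]
    by_cases hm : x ∈ a
    · rw [if_pos hm, show PySem.Set.add a x = a from by
        simp [PySem.Set.add, PySem.Set.contains, hm]]
      exact ih a
    · rw [if_neg hm, show PySem.Set.add a x = a ++ [x] from by
        simp [PySem.Set.add, PySem.Set.contains, hm]]
      exact ih (a ++ [x])

lemma pvDedupLoopMem {α : Type} [BEq α] [LawfulBEq α] (xs : List α) :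
    (xs.foldl (fun (p : PySem.Set α × List α) x =>
        if x ∈ p.1 then p else (PySem.Set.add p.1 x, p.2 ++ [x])) ([], [])).2
      = PySem.Set.ofList xs := by
  rw [PySem.Set.ofList_eq_foldl]
  exact pvDedupLoopMemAux xs []

lemma pvDedupLoopGen {α : Type} [BEq α] [LawfulBEq α] (xs : List α) :
    (xs.foldl (fun (p : PySem.Set α × List α) x =>
        if PySem.Set.contains p.1 x then p else (PySem.Set.add p.1 x, p.2 ++ [x])) (PySem.Set.empty, [])).2
      = PySem.Set.ofList xs := by
  rw [show (fun (p : PySem.Set α × List α) x =>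
        if PySem.Set.contains p.1 x then p else (PySem.Set.add p.1 x, p.2 ++ [x]))
      = (fun (p : PySem.Set α × List α) x =>
        if x ∈ p.1 then p else (PySem.Set.add p.1 x, p.2 ++ [x])) from by
    funext p x; simp [PySem.Set.contains]]
  exact pvDedupLoopMem xs

lemma pvDropLastCons (x : Char) (ys : List Char) (y : Char) :
    (x :: (ys ++ [y])).dropLast = x :: ys := by
  rw [show (x :: (ys ++ [y]) : List Char) = (x :: ys) ++ [y] by simp, List.dropLast_concat]

lemma pvSliceMid (c : Char) (xs : List Char) (y : Char) :
    PySem.List.slice ((c :: xs) ++ [y]) (some 1) (some (-1)) = xs := by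
  have h2 : ((c :: xs) ++ [y] : List Char) = c :: (xs ++ [y]) := by simp
  cases hx : xs ++ [y] with
  | nil => simp at hx
  | cons e rest =>
    rw [h2, hx]
    have : (e :: rest).dropLast = xs := by rw [← hx]; simp
    rw [show PySem.List.slice (c :: e :: rest) (some 1) (some (-1)) = (e :: rest).dropLast from by
      simp [PySem.List.slice, PySem.List.clampIdx, List.dropLast_eq_take]
      rw [if_neg (by omega : ¬((rest.length:Int) + 1 < 0))]
      omega, this]

-- ===== VERDICT (by name: the statement is the Claim_ definition above) =====
theorem apply_case_variants_spec : Claim_equal_apply_case_variants := by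
  intro word _
  unfold Spec_apply_case_variants
  by_cases h : word.toList = []
  · simp [apply_case_variants, apply_case_variants_alt, h]
  · have hw : PySem.Chars.lower word.toList ≠ [] := by
      simp [PySem.Chars.lower, h]
    obtain ⟨c, t, hct⟩ := List.exists_cons_of_ne_nil hw
    cases t with
    | nil =>
      by_cases huc : PySem.Chars.upperChar c = c <;>
        simp [apply_case_variants, apply_case_variants_alt, h, hct, PySem.Chars.len,
              PySem.List.pyGetD, PySem.List.pyGet?, PySem.List.pyIdx?,
              PySem.List.slice_from_one, PySem.List.slice_to_neg_one,
              PySem.Set.add, PySem.Set.contains, PySem.Set.empty, huc]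
    | cons d t2 =>
      have hne : (d :: t2 : List Char) ≠ [] := by simp
      obtain ⟨D, tl, hDtl⟩ : ∃ (D : List Char) (tl : Char), (d :: t2 : List Char) = D ++ [tl] :=
        ⟨(d :: t2).dropLast, (d :: t2).getLast hne, (List.dropLast_append_getLast hne).symm⟩
      rw [hDtl] at hct
      rw [apply_case_variants, apply_case_variants_alt, if_neg h, if_neg h]
      simp only [hct]
      rw [if_pos (show (1:Int) ≤ PySem.Chars.len (c :: (D ++ [tl])) from by
            simp [PySem.Chars.len]; omega),
          if_pos (show (2:Int) ≤ PySem.Chars.len (c :: (D ++ [tl])) from by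
            simp [PySem.Chars.len]; omega),
          if_neg (show ¬ PySem.Chars.len (c :: (D ++ [tl])) = 1 from by
            simp [PySem.Chars.len]; omega),
          pvDedupLoopGen]
      rw [show ((c :: (D ++ [tl])) : List Char) = (c :: D) ++ [tl] from by simp] at *
      rw [PySem.List.pyGetD_zero, PySem.List.pyGetD_neg_one_append_singleton,
          PySem.List.slice_from_one, PySem.List.slice_to_neg_one, pvSliceMid]
      simp only [List.getD, List.tail_cons, List.getElem?_cons_zero,
        Option.getD_some, List.cons_append, List.nil_append]
      by_cases hF : PySem.Chars.upperChar c = c <;>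
      by_cases hL : PySem.Chars.upperChar tl = tl <;>
        simp [PySem.Set.ofList, PySem.Set.add, PySem.Set.contains, pvDropLastCons, hF, hL,
              List.cons.injEq]
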